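-- pv_equiv track=rewrite | github.com/MFaii/UTN_PROG_1 | Practica/Ej_Lady_Gaga/Funciones.py | obtener_titulo
-- ===== SOURCE A (Python) =====
-- def obtener_titulo(tema: str) -> str:
--     titulo = ""
--     bandera_colaborador = False
--     bandera_guion = False
--     for i in range(len(tema)):
--         if tema[i] == "|":
--             bandera_colaborador = True
--         if bandera_colaborador == True and tema[i - 2] == "-":
--             bandera_guion = True
--         if bandera_guion == True:
--             titulo += tema[i]
--
--     if bandera_colaborador == False:
--         titulo = tema
--
--     return titulo
-- ===== SOURCE B (Python) =====
-- def obtener_titulo(tema: str) -> str: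
--     p = tema.find('|')
--     if p == -1:
--         return tema
--     for j in range(p, len(tema)):
--         if tema[j - 2] == '-':
--             return tema[j:]
--     return ''
-- ===== Notes on version B (the rewrite author's own statement) =====
-- stated objective: simpler
-- what changed: B replaces A's single pass threading two boolean flags and appending characters one by one with a locate-then-slice decomposition: find the first '|', scan forward for the first index j with tema[j-2]=='-', and return the tail slice tema[j:] (or '' if none, or tema unchanged if no '|').
import Mathlib
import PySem

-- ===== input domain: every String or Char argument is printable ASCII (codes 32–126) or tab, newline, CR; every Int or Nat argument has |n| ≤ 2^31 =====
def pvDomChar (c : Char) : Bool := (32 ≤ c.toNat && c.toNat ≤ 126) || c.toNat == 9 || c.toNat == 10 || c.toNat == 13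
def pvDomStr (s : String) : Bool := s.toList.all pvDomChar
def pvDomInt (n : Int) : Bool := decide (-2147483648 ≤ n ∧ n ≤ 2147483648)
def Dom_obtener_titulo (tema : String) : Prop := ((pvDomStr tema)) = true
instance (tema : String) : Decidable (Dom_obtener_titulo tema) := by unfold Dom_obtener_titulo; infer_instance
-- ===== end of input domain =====

-- B replaces A's flag-threaded appending pass with find-the-pipe / scan-for-the-dash / slice-the-tail (objective: simpler).
-- Indexing is ported with pyGetD; on every input admitted by Pre_ the indices are in range, so this is exact.

-- ===== PORT A =====
-- the loop body of A, one step per index i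
def pvStepA (cs : List Char) (s : List Char × Bool × Bool) (i : Int) : List Char × Bool × Bool :=
  let bc := if PySem.List.pyGetD cs i ' ' = '|' then true else s.2.1
  let bg := if bc = true ∧ PySem.List.pyGetD cs (i - 2) ' ' = '-' then true else s.2.2
  let t := if bg = true then s.1 ++ [PySem.List.pyGetD cs i ' '] else s.1
  (t, bc, bg)

def obtener_titulo (tema : String) : String :=
  let cs := tema.toList
  let st := (PySem.List.pyRange 0 (cs.length : Int) 1).foldl (pvStepA cs) ([], false, false)
  if st.2.1 = false then tema else String.ofList st.1

-- ===== PORT B =====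
-- the 'for j in range(p, len(tema))' loop of Source B: first j with tema[j-2] == '-' gives tema[j:], else ''
def pvScan (cs : List Char) (j : Nat) : String :=
  if h : j < cs.length then
    if PySem.List.pyGetD cs ((j : Int) - 2) ' ' = '-' then String.ofList (cs.drop j)
    else pvScan cs (j + 1)
  else ""
termination_by cs.length - j

def obtener_titulo_alt (tema : String) : String :=
  let p := PySem.Str.find tema "|"
  if p = -1 then tema
  else pvScan tema.toList p.toNat

-- ===== PRECONDITION & SPEC =====
-- Pre_ excludes exactly the input "|", the only string on which the Python A (and also B) raises
-- IndexError: length 1 with the collaborator flag set, so tema[-2] is evaluated and is out of range.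
def Pre_obtener_titulo (tema : String) : Prop := tema ≠ "|"
instance (tema : String) : Decidable (Pre_obtener_titulo tema) := by unfold Pre_obtener_titulo; infer_instance
def pvWitness_obtener_titulo : String := "cancion - x | feat y"
def Spec_obtener_titulo (tema : String) (out : String) : Prop := out = obtener_titulo_alt tema
instance (tema : String) (out : String) : Decidable (Spec_obtener_titulo tema out) := by unfold Spec_obtener_titulo; infer_instance

-- ===== CLAIM (what is proved, stated in full; the proofs are below) =====
def Claim_equal_obtener_titulo : Prop := ∀ (tema : String), Dom_obtener_titulo tema → Pre_obtener_titulo tema → Spec_obtener_titulo tema (obtener_titulo tema)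

-- ===== LEMMAS AND PROOFS =====

-- pyGetD at an in-range Nat index is plain indexing
theorem pvGetD_at (cs : List Char) (j : Nat) (h : j < cs.length) :
    PySem.List.pyGetD cs (j : Int) ' ' = cs[j] := by
  rw [PySem.List.pyGetD_natCast]; exact List.getD_eq_getElem cs ' ' h

-- once both flags are set, every later step appends the current character
theorem foldA_tt (cs : List Char) (L : List Int) (t : List Char) :
    L.foldl (pvStepA cs) (t, true, true)
      = (t ++ L.map (fun i => PySem.List.pyGetD cs i ' '), true, true) := by
  induction L generalizing t with
  | nil => simp
  | cons a L ih => simp [List.foldl_cons, pvStepA, ih]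

-- with the collaborator flag set and the dash flag not yet, the rest of A's loop computes pvScan
theorem foldA_scan (cs : List Char) (k : Nat) :
    ∀ (j : Nat) (t : List Char), cs.length - j ≤ k →
    (PySem.List.pyRange (j : Int) (cs.length : Int) 1).foldl (pvStepA cs) (t, true, false)
      = (t ++ (pvScan cs j).toList, true, decide ((pvScan cs j).toList ≠ [])) := by
  induction k with
  | zero =>
    intro j t hk
    have hlen : cs.length ≤ j := by omega
    rw [PySem.List.pyRange_one_eq_nil (by exact_mod_cast hlen), pvScan]
    simp [Nat.not_lt.mpr hlen]
  | succ k ih =>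
    intro j t hk
    by_cases h : j < cs.length
    · rw [PySem.List.pyRange_one_cons (by exact_mod_cast h)]
      have hcast : ((j : Int) + 1) = (((j + 1 : Nat)) : Int) := by push_cast; ring
      by_cases hc : PySem.List.pyGetD cs ((j : Int) - 2) ' ' = '-'
      · have hstep : pvStepA cs (t, true, false) (j : Int)
            = (t ++ [PySem.List.pyGetD cs (j : Int) ' '], true, true) := by
          simp [pvStepA, hc]
        have hps : pvScan cs j = String.ofList (cs.drop j) := by
          rw [pvScan, dif_pos h, if_pos hc]
        rw [List.foldl_cons, hstep, foldA_tt, hcast,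
          PySem.List.map_pyGetD_pyRange' cs ' ' (by positivity), hps]
        have hdropj : cs.drop j = cs[j] :: cs.drop (j + 1) := List.drop_eq_getElem_cons h
        rw [String.toList_ofList, Int.toNat_natCast, pvGetD_at cs j h, hdropj]
        simp
        omega
      · have hstep : pvStepA cs (t, true, false) (j : Int) = (t, true, false) := by
          simp [pvStepA, hc]
        have hps : pvScan cs j = pvScan cs (j + 1) := by
          rw [pvScan, dif_pos h, if_neg hc]
        rw [List.foldl_cons, hstep, hcast, ih (j + 1) t (by omega), hps]
    · have hlen : cs.length ≤ j := by omega
      rw [PySem.List.pyRange_one_eq_nil (by exact_mod_cast hlen), pvScan]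
      simp [Nat.not_lt.mpr hlen]

-- while no '|' has been seen, the state stays ("", False, False)
theorem foldA_nopipe (cs : List Char) (k : Nat) :
    ∀ (j : Nat), cs.length - j ≤ k → '|' ∉ cs.drop j →
    (PySem.List.pyRange (j : Int) (cs.length : Int) 1).foldl (pvStepA cs) ([], false, false)
      = ([], false, false) := by
  induction k with
  | zero =>
    intro j hk _
    rw [PySem.List.pyRange_one_eq_nil (by exact_mod_cast (show cs.length ≤ j by omega))]
    rfl
  | succ k ih =>
    intro j hk hmem
    by_cases h : j < cs.length
    · rw [PySem.List.pyRange_one_cons (by exact_mod_cast h)]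
      have hdropj : cs.drop j = cs[j] :: cs.drop (j + 1) := List.drop_eq_getElem_cons h
      have hne : cs[j] ≠ '|' := by
        intro hc; exact hmem (by rw [hdropj, hc]; exact List.mem_cons_self)
      have hstep : pvStepA cs ([], false, false) (j : Int) = ([], false, false) := by
        simp [pvStepA, pvGetD_at cs j h, hne]
      have hcast : ((j : Int) + 1) = (((j + 1 : Nat)) : Int) := by push_cast; ring
      rw [List.foldl_cons, hstep, hcast]
      exact ih (j + 1) (by omega)
        (by rw [hdropj] at hmem; exact fun hx => hmem (List.mem_cons_of_mem _ hx))
    · rw [PySem.List.pyRange_one_eq_nil (by exact_mod_cast (show cs.length ≤ j by omega))]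
      rfl

-- the step at the first '|' itself: from there on A's loop computes pvScan cs p
theorem foldA_at_pipe (cs : List Char) (p : Nat) (hp : p < cs.length) (hpipe : cs[p] = '|') :
    (PySem.List.pyRange (p : Int) (cs.length : Int) 1).foldl (pvStepA cs) ([], false, false)
      = ((pvScan cs p).toList, true, decide ((pvScan cs p).toList ≠ [])) := by
  rw [PySem.List.pyRange_one_cons (by exact_mod_cast hp)]
  have hget : PySem.List.pyGetD cs (p : Int) ' ' = '|' := by rw [pvGetD_at cs p hp, hpipe]
  have hcast : ((p : Int) + 1) = (((p + 1 : Nat)) : Int) := by push_cast; ring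
  by_cases hc : PySem.List.pyGetD cs ((p : Int) - 2) ' ' = '-'
  · have hstep : pvStepA cs ([], false, false) (p : Int)
        = ([PySem.List.pyGetD cs (p : Int) ' '], true, true) := by
      simp [pvStepA, hget, hc]
    have hps : pvScan cs p = String.ofList (cs.drop p) := by
      rw [pvScan, dif_pos hp, if_pos hc]
    rw [List.foldl_cons, hstep, foldA_tt, hcast,
      PySem.List.map_pyGetD_pyRange' cs ' ' (by positivity), hps]
    have hdropp : cs.drop p = cs[p] :: cs.drop (p + 1) := List.drop_eq_getElem_cons hp
    rw [String.toList_ofList, Int.toNat_natCast, pvGetD_at cs p hp, hdropp]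
    simp
    omega
  · have hstep : pvStepA cs ([], false, false) (p : Int) = ([], true, false) := by
      simp [pvStepA, hget, hc]
    have hps : pvScan cs p = pvScan cs (p + 1) := by
      rw [pvScan, dif_pos hp, if_neg hc]
    rw [List.foldl_cons, hstep, hcast, foldA_scan cs (cs.length - (p + 1)) (p + 1) [] le_rfl, hps]
    simp

-- from any point before the first '|' (at index p), A's loop computes pvScan cs p
theorem foldA_main (cs : List Char) (p : Nat) (hp : p < cs.length) (hpipe : cs[p] = '|') :
    ∀ (k j : Nat), p - j ≤ k → j ≤ p →
    (∀ i, (hi : i < cs.length) → j ≤ i → i < p → cs[i] ≠ '|') →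
    (PySem.List.pyRange (j : Int) (cs.length : Int) 1).foldl (pvStepA cs) ([], false, false)
      = ((pvScan cs p).toList, true, decide ((pvScan cs p).toList ≠ [])) := by
  intro k
  induction k with
  | zero =>
    intro j hk hj _
    have hjp : j = p := by omega
    subst hjp
    exact foldA_at_pipe cs j hp hpipe
  | succ k ih =>
    intro j hk hj hnone
    by_cases hjp : j = p
    · subst hjp
      exact foldA_at_pipe cs j hp hpipe
    · have hjlt : j < p := by omega
      have hjlen : j < cs.length := by omega
      rw [PySem.List.pyRange_one_cons (by exact_mod_cast hjlen)]
      have hne : cs[j] ≠ '|' := hnone j hjlen le_rfl hjlt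
      have hstep : pvStepA cs ([], false, false) (j : Int) = ([], false, false) := by
        simp [pvStepA, pvGetD_at cs j hjlen, hne]
      have hcast : ((j : Int) + 1) = (((j + 1 : Nat)) : Int) := by push_cast; ring
      rw [List.foldl_cons, hstep, hcast]
      exact ih (j + 1) (by omega) (by omega) (fun i hi h1 h2 => hnone i hi (by omega) h2)

-- ===== VERDICT (by name: the statement is the Claim_ definition above) =====
theorem obtener_titulo_spec : Claim_equal_obtener_titulo := by
  intro tema _ _
  unfold Spec_obtener_titulo
  show obtener_titulo tema = obtener_titulo_alt tema
  simp only [obtener_titulo, obtener_titulo_alt]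
  by_cases hmem : '|' ∈ tema.toList
  · -- a pipe exists: find returns its first index p
    have hinf : (("|" : String).toList) <:+: tema.toList := by
      rw [show ("|" : String).toList = ['|'] from rfl]
      exact (List.singleton_infix_iff _ _).mpr hmem
    have hfind0 : 0 ≤ PySem.Str.find tema "|" := by
      rw [PySem.Str.find_eq]; exact (PySem.Chars.find_nonneg_iff _ _).mpr hinf
    have hfindne : ¬ (PySem.Str.find tema "|" = -1) := by omega
    obtain ⟨hpref, hmin⟩ := PySem.Chars.find_spec
      (by rw [PySem.Str.find_eq] at hfind0; exact hfind0)
    rw [← PySem.Str.find_eq] at hpref hmin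
    rw [show ("|" : String).toList = ['|'] from rfl] at hpref hmin
    obtain ⟨rest, hrest⟩ := hpref
    have hp : (PySem.Str.find tema "|").toNat < tema.toList.length := by
      by_contra hlen
      rw [List.drop_eq_nil_of_le (by omega)] at hrest
      simp at hrest
    have hpipe : tema.toList[(PySem.Str.find tema "|").toNat] = '|' := by
      have h1 := hrest
      rw [List.drop_eq_getElem_cons hp] at h1
      simp only [List.singleton_append, List.cons.injEq] at h1
      exact h1.1.symm
    have hnone : ∀ i, (hi : i < tema.toList.length) → 0 ≤ i →
        i < (PySem.Str.find tema "|").toNat → tema.toList[i] ≠ '|' := by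
      intro i hi _ hip hci
      exact hmin i hip ⟨tema.toList.drop (i + 1), by
        rw [List.drop_eq_getElem_cons hi, hci]; rfl⟩
    have hA := foldA_main tema.toList (PySem.Str.find tema "|").toNat hp hpipe
      (PySem.Str.find tema "|").toNat 0 (by omega) (by omega) hnone
    rw [Nat.cast_zero] at hA
    rw [hA, if_neg hfindne]
    simp [String.ofList_toList]
  · -- no pipe: A keeps both flags false and returns tema; B's find gives -1
    have hfind : PySem.Str.find tema "|" = -1 := by
      rw [PySem.Str.find_eq]
      refine (PySem.Chars.find_eq_neg_one_iff _ _).mpr ?_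
      rw [show ("|" : String).toList = ['|'] from rfl]
      exact fun h => hmem ((List.singleton_infix_iff _ _).mp h)
    have hA := foldA_nopipe tema.toList tema.toList.length 0 (by omega) (by simpa using hmem)
    rw [Nat.cast_zero] at hA
    rw [hA, if_pos hfind]
    simp
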